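-- pv_equiv track=rewrite | github.com/MEDUZZZZZZZ/Python | lesson_5/task_5_2.py | iterator_with_yeld_for
-- ===== SOURCE A (Python) =====
-- def iterator_with_yeld_for(n):
--     """Генератор через цикл for"""
--     sum = 0
--     for counter in range(n+1):
--         if counter % 2 != 0 and counter**2 < 200:
--             sum += counter
--             yield counter, sum
--         else:
--             continue
-- ===== SOURCE B (Python) =====
-- def iterator_with_yeld_for(n):
--     """Direct enumeration of the odd numbers 2*k-1 with the closed-form
--     running sum k*k, instead of filtering range(n+1) with an accumulator."""
--     k = 1
--     while True:
--         counter = 2 * k - 1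
--         if counter > n or counter * counter >= 200:
--             return
--         yield counter, k * k
--         k += 1
-- ===== Notes on version B (the rewrite author's own statement) =====
-- stated objective: faster
-- what changed: Replaces the filtered scan of range(n+1) with an accumulator by a direct enumeration of the odd numbers 2*k-1 carrying the closed-form running sum k*k, stopping at the first failing term, so a constant number of iterations run regardless of n.
import Mathlib
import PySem

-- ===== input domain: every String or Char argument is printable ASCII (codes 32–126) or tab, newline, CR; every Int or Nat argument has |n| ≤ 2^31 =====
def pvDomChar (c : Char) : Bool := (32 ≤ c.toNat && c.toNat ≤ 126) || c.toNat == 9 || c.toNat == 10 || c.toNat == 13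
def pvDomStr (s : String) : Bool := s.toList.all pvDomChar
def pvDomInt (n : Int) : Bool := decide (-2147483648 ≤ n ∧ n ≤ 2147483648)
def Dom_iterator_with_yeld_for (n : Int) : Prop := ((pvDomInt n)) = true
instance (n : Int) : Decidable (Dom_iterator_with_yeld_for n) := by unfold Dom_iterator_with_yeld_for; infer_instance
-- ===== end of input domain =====

-- B enumerates the odd numbers 2*k-1 directly with the closed-form running sum k*k
-- and stops at the first failing term, so it runs O(1) steps instead of A's O(n) scan.


-- ===== PORT A =====
-- for counter in range(n+1): if counter % 2 != 0 and counter**2 < 200: sum += counter; yield counter, sum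
def iterator_with_yeld_for (n : Int) : List (Int × Int) :=
  ((PySem.List.pyRange 0 (n + 1) 1).foldl
    (fun (st : Int × List (Int × Int)) counter =>
      if PySem.Int.mod counter 2 ≠ 0 ∧ counter ^ 2 < 200 then
        (st.1 + counter, st.2 ++ [(counter, st.1 + counter)])
      else st)
    (0, [])).2

-- ===== PORT B =====
-- B's 'while True' loop; the fuel argument only makes the recursion structural,
-- and the loop provably exhausts its condition before the fuel does (see alt_high).
def iteratorAltGo (n : Int) : Nat → Nat → List (Int × Int)
  | _, 0 => []
  | k, fuel + 1 =>
    let counter : Int := 2 * (k : Int) - 1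
    if counter > n ∨ counter * counter ≥ 200 then []
    else (counter, (k : Int) * (k : Int)) :: iteratorAltGo n (k + 1) fuel

def iterator_with_yeld_for_alt (n : Int) : List (Int × Int) :=
  iteratorAltGo n 1 8

-- ===== PRECONDITION & SPEC =====
def Spec_iterator_with_yeld_for (n : Int) (out : List (Int × Int)) : Prop := out = iterator_with_yeld_for_alt n
instance (n : Int) (out : List (Int × Int)) : Decidable (Spec_iterator_with_yeld_for n out) := by unfold Spec_iterator_with_yeld_for; infer_instance

-- ===== CLAIM (what is proved, stated in full; the proofs are below) =====
def Claim_equal_iterator_with_yeld_for : Prop := ∀ (n : Int), Dom_iterator_with_yeld_for n → Spec_iterator_with_yeld_for n (iterator_with_yeld_for n)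

-- ===== LEMMAS AND PROOFS =====

-- the full output for large enough n: every odd number whose square is below 200, with its running sum
def pvFullList : List (Int × Int) := [(1,1),(3,4),(5,9),(7,16),(9,25),(11,36),(13,49)]

-- A's loop body is a no-op on every counter past the last yielded one (the next even value fails the parity test, larger ones the square test)
lemma foldl_dead (l : List Int) (hl : ∀ x ∈ l, (14:Int) ≤ x) (st : Int × List (Int × Int)) :
    l.foldl
      (fun (st : Int × List (Int × Int)) counter =>
        if PySem.Int.mod counter 2 ≠ 0 ∧ counter ^ 2 < 200 then
          (st.1 + counter, st.2 ++ [(counter, st.1 + counter)])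
        else st) st = st := by
  induction l generalizing st with
  | nil => rfl
  | cons x t ih =>
    have hx : (14:Int) ≤ x := hl x (List.mem_cons_self ..)
    have hcond : ¬ (PySem.Int.mod x 2 ≠ 0 ∧ x ^ 2 < 200) := by
      rcases eq_or_lt_of_le hx with h14 | h15
      · intro h; exact h.1 (by rw [← h14]; decide)
      · intro h
        have : (200:Int) ≤ x ^ 2 := by nlinarith
        omega
    simp only [List.foldl_cons, if_neg hcond]
    exact ih (fun y hy => hl y (List.mem_cons_of_mem _ hy)) st

lemma a_high (n : Int) (h : 13 ≤ n) : iterator_with_yeld_for n = pvFullList := by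
  unfold iterator_with_yeld_for
  rw [PySem.List.pyRange_one_append 0 14 (n + 1) (by norm_num) (by omega),
      List.foldl_append]
  have h1 : ((PySem.List.pyRange 0 14 1).foldl
      (fun (st : Int × List (Int × Int)) counter =>
        if PySem.Int.mod counter 2 ≠ 0 ∧ counter ^ 2 < 200 then
          (st.1 + counter, st.2 ++ [(counter, st.1 + counter)])
        else st) (0, [])) = (49, pvFullList) := by decide
  rw [h1, foldl_dead _ (fun x hx => ((PySem.List.mem_pyRange_one).1 hx).1)]

lemma alt_high (n : Int) (h : 13 ≤ n) : iterator_with_yeld_for_alt n = pvFullList := by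
  unfold iterator_with_yeld_for_alt
  simp only [iteratorAltGo, pvFullList]
  norm_num
  split_ifs <;> first | rfl | omega

-- ===== VERDICT (by name: the statement is the Claim_ definition above) =====
theorem iterator_with_yeld_for_spec : Claim_equal_iterator_with_yeld_for := by
  intro n _
  unfold Spec_iterator_with_yeld_for
  by_cases h : 13 ≤ n
  · rw [a_high n h, alt_high n h]
  · by_cases h0 : 0 ≤ n
    · interval_cases n <;> decide
    · -- n < 0: range(n+1) is empty and B's first guard fails
      unfold iterator_with_yeld_for iterator_with_yeld_for_alt
      rw [PySem.List.pyRange_one_eq_nil (by omega)]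
      simp only [iteratorAltGo]
      norm_num
      omega
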